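-- pv_equiv track=rewrite | github.com/gattupallik99/causal5g | causal/engine/recalibrator.py | _edges_from_nf
-- ===== SOURCE A (Python) =====
-- def _edges_from_nf(nf: str) -> list[tuple[str, str]]:
--     """
--     Return all known causal edges where `nf` is the cause.
--     Uses a hardcoded 5G NF topology — in production this would
--     query SliceTopologyManager for the live slice graph.
--     """
--     # 5G SA core causal graph — cause → effects
--     NF_OUTGOING: dict[str, list[str]] = {
--         "nrf":  ["amf", "smf", "pcf", "udm", "upf"],
--         "ausf": ["amf"],
--         "udr":  ["udm"],
--         "amf":  ["smf"],
--         "smf":  ["upf", "pcf"],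
--         "pcf":  ["smf"],
--         "udm":  ["amf"],
--         "upf":  [],
--     }
--     targets = NF_OUTGOING.get(nf, [])
--     return [(nf, t) for t in targets]
-- ===== SOURCE B (Python) =====
-- _EDGES: list[tuple[str, str]] = [
--     ("nrf", "amf"), ("nrf", "smf"), ("nrf", "pcf"), ("nrf", "udm"), ("nrf", "upf"),
--     ("ausf", "amf"),
--     ("udr", "udm"),
--     ("amf", "smf"),
--     ("smf", "upf"), ("smf", "pcf"),
--     ("pcf", "smf"),
--     ("udm", "amf"),
-- ]
--
-- def _edges_from_nf(nf: str) -> list[tuple[str, str]]: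
--     return [e for e in _EDGES if e[0] == nf]
-- ===== Notes on version B (the rewrite author's own statement) =====
-- stated objective: simpler
-- what changed: Replaces the per-call dict-of-target-lists plus a tuple-building comprehension with a single module-level flat edge list filtered by cause, a representation change from indexed lookup to a full edge scan.
import Mathlib
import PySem

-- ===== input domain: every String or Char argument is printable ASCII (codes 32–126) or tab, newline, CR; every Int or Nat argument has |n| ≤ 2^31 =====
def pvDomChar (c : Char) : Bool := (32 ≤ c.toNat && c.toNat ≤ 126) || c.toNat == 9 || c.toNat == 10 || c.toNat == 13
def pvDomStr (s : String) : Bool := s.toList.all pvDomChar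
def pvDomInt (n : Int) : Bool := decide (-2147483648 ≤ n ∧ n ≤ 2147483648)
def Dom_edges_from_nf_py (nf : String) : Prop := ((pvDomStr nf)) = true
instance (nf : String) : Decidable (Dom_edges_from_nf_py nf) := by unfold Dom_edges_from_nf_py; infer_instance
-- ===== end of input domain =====

-- B replaces A's dict-of-target-lists lookup with a filter over one flat (cause, effect) edge list: simpler representation, same output.

-- ===== PORT A =====
def edges_from_nf_py (nf : String) : List (String × String) :=
  let NF_OUTGOING : PySem.Dict String (List String) :=
    PySem.Dict.ofList
      [ ("nrf",  ["amf", "smf", "pcf", "udm", "upf"]),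
        ("ausf", ["amf"]),
        ("udr",  ["udm"]),
        ("amf",  ["smf"]),
        ("smf",  ["upf", "pcf"]),
        ("pcf",  ["smf"]),
        ("udm",  ["amf"]),
        ("upf",  ([] : List String)) ]
  let targets := NF_OUTGOING.getD nf []
  targets.map (fun t => (nf, t))

-- ===== PORT B =====
def pvEdges : List (String × String) :=
  [ ("nrf", "amf"), ("nrf", "smf"), ("nrf", "pcf"), ("nrf", "udm"), ("nrf", "upf"),
    ("ausf", "amf"),
    ("udr", "udm"),
    ("amf", "smf"),
    ("smf", "upf"), ("smf", "pcf"),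
    ("pcf", "smf"),
    ("udm", "amf") ]

def edges_from_nf_py_alt (nf : String) : List (String × String) :=
  pvEdges.filter (fun e => e.1 == nf)

-- ===== PRECONDITION & SPEC =====
def Spec_edges_from_nf_py (nf : String) (out : List (String × String)) : Prop := out = edges_from_nf_py_alt nf
instance (nf : String) (out : List (String × String)) : Decidable (Spec_edges_from_nf_py nf out) := by unfold Spec_edges_from_nf_py; infer_instance

-- ===== CLAIM (what is proved, stated in full; the proofs are below) =====
def Claim_equal_edges_from_nf_py : Prop := ∀ (nf : String), Dom_edges_from_nf_py nf → Spec_edges_from_nf_py nf (edges_from_nf_py nf)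

-- ===== LEMMAS AND PROOFS =====

-- Both sides agree for each of the eight known keys (checked literally) and return [] for any other string.
theorem pv_eq (nf : String) : edges_from_nf_py nf = edges_from_nf_py_alt nf := by
  by_cases h1 : nf = "nrf"; · subst h1; rfl
  by_cases h2 : nf = "ausf"; · subst h2; rfl
  by_cases h3 : nf = "udr"; · subst h3; rfl
  by_cases h4 : nf = "amf"; · subst h4; rfl
  by_cases h5 : nf = "smf"; · subst h5; rfl
  by_cases h6 : nf = "pcf"; · subst h6; rfl
  by_cases h7 : nf = "udm"; · subst h7; rfl
  by_cases h8 : nf = "upf"; · subst h8; rfl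
  -- unknown NF: both sides are []
  simp [edges_from_nf_py, edges_from_nf_py_alt, pvEdges,
        PySem.Dict.ofList, PySem.Dict.update, PySem.Dict.getD_insert, PySem.Dict.getD_empty,
        Ne.symm h1, Ne.symm h2, Ne.symm h3, Ne.symm h4, Ne.symm h5, Ne.symm h6, Ne.symm h7, Ne.symm h8,
        h1, h2, h3, h4, h5, h6, h7, h8]

-- ===== VERDICT (by name: the statement is the Claim_ definition above) =====
theorem edges_from_nf_py_spec : Claim_equal_edges_from_nf_py := by
  intro nf _
  exact pv_eq nf
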